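-- pv_equiv track=rewrite | github.com/eroge-69/PyToExe | python-files/bulk_scrapper.py | estimate_class_count
-- ===== SOURCE A (Python) =====
-- def estimate_class_count(text):
--     text = text.lower()
--     count = sum(text.count(day) for day in [
--         "monday", "tuesday", "wednesday", "thursday", "friday", "saturday", "sunday"
--     ])
--     if "daily" in text or "every day" in text:
--         count = max(count, 7)
--     if count >= 46:
--         return "46+"
--     elif count >= 41:
--         return "41–45"
--     elif count >= 36:
--         return "36–40"
--     elif count >= 31:
--         return "31–35"
--     elif count >= 26:
--         return "26–30"
--     elif count >= 21:
--         return "21–25"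
--     elif count >= 15:
--         return "15–20"
--     elif count >= 11:
--         return "11–14"
--     elif count >= 8:
--         return "8–10"
--     elif count >= 5:
--         return "5–7"
--     elif count >= 1:
--         return "1–4"
--     return "0"
-- ===== SOURCE B (Python) =====
-- def estimate_class_count(text):
--     text = text.lower()
--     count = sum(text.count(day) for day in [
--         "monday", "tuesday", "wednesday", "thursday", "friday", "saturday", "sunday"
--     ])
--     if "daily" in text or "every day" in text:
--         count = max(count, 7)
--     thresholds = [1, 5, 8, 11, 15, 21, 26, 31, 36, 41, 46]
--     labels = ["0", "1\u20134", "5\u20137", "8\u201310", "11\u201314", "15\u201320",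
--               "21\u201325", "26\u201330", "31\u201335", "36\u201340", "41\u201345", "46+"]
--     # bisect_right by hand (A imports no modules, so no bisect import)
--     lo, hi = 0, len(thresholds)
--     while lo < hi:
--         mid = (lo + hi) // 2
--         if thresholds[mid] <= count:
--             lo = mid + 1
--         else:
--             hi = mid
--     return labels[lo]
-- ===== Notes on version B (the rewrite author's own statement) =====
-- stated objective: idiomatic
-- what changed: Replaced the 11-way if/elif threshold cascade with a precomputed threshold/label table consulted by a hand-written bisect_right binary search; the day-name counting is unchanged.
import Mathlib
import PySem

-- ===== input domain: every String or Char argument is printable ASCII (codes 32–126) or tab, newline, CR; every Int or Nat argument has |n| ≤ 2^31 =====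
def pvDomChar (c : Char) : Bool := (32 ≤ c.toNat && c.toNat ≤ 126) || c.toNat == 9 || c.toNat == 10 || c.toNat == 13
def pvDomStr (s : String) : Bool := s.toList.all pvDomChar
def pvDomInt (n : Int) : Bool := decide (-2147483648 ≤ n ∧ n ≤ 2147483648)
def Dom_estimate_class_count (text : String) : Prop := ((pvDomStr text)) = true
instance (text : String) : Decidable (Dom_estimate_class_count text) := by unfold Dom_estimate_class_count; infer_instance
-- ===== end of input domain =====

-- B replaces A's 11-way if/elif cascade with a threshold/label table and a binary search (bisect_right); objective: idiomatic table-driven lookup, same cost.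


-- ===== PORT A =====
def estimate_class_count (text : String) : String :=
  let t := PySem.Str.lower text
  let count : Int :=
    (([ "monday", "tuesday", "wednesday", "thursday", "friday", "saturday", "sunday"
      ] : List String).map (fun day => (PySem.Str.count t day : Int))).sum
  let count := if PySem.Str.isIn "daily" t || PySem.Str.isIn "every day" t then max count 7 else count
  if count ≥ 46 then "46+"
  else if count ≥ 41 then "41–45"
  else if count ≥ 36 then "36–40"
  else if count ≥ 31 then "31–35"
  else if count ≥ 26 then "26–30"
  else if count ≥ 21 then "21–25"
  else if count ≥ 15 then "15–20"
  else if count ≥ 11 then "11–14"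
  else if count ≥ 8 then "8–10"
  else if count ≥ 5 then "5–7"
  else if count ≥ 1 then "1–4"
  else "0"

-- ===== PORT B =====
def pvThresholds : List Int := [1, 5, 8, 11, 15, 21, 26, 31, 36, 41, 46]

def pvLabels : List String :=
  ["0", "1–4", "5–7", "8–10", "11–14", "15–20", "21–25", "26–30", "31–35", "36–40", "41–45", "46+"]

-- the hand-written bisect_right loop of Source B (lo/hi two-pointer binary search)
def pvBisect (count : Int) (lo hi : Nat) : Nat :=
  if h : lo < hi then
    let mid := (lo + hi) / 2
    if pvThresholds.getD mid 0 ≤ count then pvBisect count (mid + 1) hi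
    else pvBisect count lo mid
  else lo
termination_by hi - lo
decreasing_by all_goals omega

def estimate_class_count_alt (text : String) : String :=
  let t := PySem.Str.lower text
  let count : Int :=
    (([ "monday", "tuesday", "wednesday", "thursday", "friday", "saturday", "sunday"
      ] : List String).map (fun day => (PySem.Str.count t day : Int))).sum
  let count := if PySem.Str.isIn "daily" t || PySem.Str.isIn "every day" t then max count 7 else count
  pvLabels.getD (pvBisect count 0 pvThresholds.length) ""

-- ===== PRECONDITION & SPEC =====
def Spec_estimate_class_count (text : String) (out : String) : Prop := out = estimate_class_count_alt text
instance (text : String) (out : String) : Decidable (Spec_estimate_class_count text out) := by unfold Spec_estimate_class_count; infer_instance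

-- ===== CLAIM (what is proved, stated in full; the proofs are below) =====
def Claim_equal_estimate_class_count : Prop := ∀ (text : String), Dom_estimate_class_count text → Spec_estimate_class_count text (estimate_class_count text)

-- ===== LEMMAS AND PROOFS =====
set_option maxHeartbeats 1000000 in
-- the binary search over the fixed 11-entry table, fully evaluated region by region
theorem pvBisect_eq (c : Int) :
    pvBisect c 0 11 =
      if 46 ≤ c then 11 else if 41 ≤ c then 10 else if 36 ≤ c then 9
      else if 31 ≤ c then 8 else if 26 ≤ c then 7 else if 21 ≤ c then 6
      else if 15 ≤ c then 5 else if 11 ≤ c then 4 else if 8 ≤ c then 3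
      else if 5 ≤ c then 2 else if 1 ≤ c then 1 else 0 := by
  rw [pvBisect]; norm_num [pvThresholds]
  rw [pvBisect, pvBisect]; norm_num [pvThresholds]
  rw [pvBisect, pvBisect, pvBisect, pvBisect]; norm_num [pvThresholds]
  repeat rw [pvBisect]
  norm_num [pvThresholds]
  repeat rw [pvBisect]
  norm_num [pvThresholds]
  split_ifs <;> omega

set_option maxHeartbeats 1000000 in
theorem pvBisect_eval (c : Int) :
    pvLabels.getD (pvBisect c 0 pvThresholds.length) "" =
      if 46 ≤ c then "46+"
      else if 41 ≤ c then "41–45"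
      else if 36 ≤ c then "36–40"
      else if 31 ≤ c then "31–35"
      else if 26 ≤ c then "26–30"
      else if 21 ≤ c then "21–25"
      else if 15 ≤ c then "15–20"
      else if 11 ≤ c then "11–14"
      else if 8 ≤ c then "8–10"
      else if 5 ≤ c then "5–7"
      else if 1 ≤ c then "1–4"
      else "0" := by
  have h : pvThresholds.length = 11 := rfl
  rw [h, pvBisect_eq]
  split_ifs <;> rfl

theorem estimate_class_count_spec : Claim_equal_estimate_class_count := by
  intro text _
  unfold Spec_estimate_class_count estimate_class_count estimate_class_count_alt
  rw [pvBisect_eval]
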